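-- pv_equiv track=rewrite | github.com/AdamCottrill/fsdviz | fsdviz/common/utils.py | make_mu_id_lookup
-- ===== SOURCE A (Python) =====
-- def make_mu_id_lookup(mus):
--     """a function that lakes of list of management unit objects and
--     returns a dictionary of dictionaryies that are keyed first by lake ,
--     and then by management unit label.
--
--     mus = ManagementUnit.objects.values_list(
--     "id", "slug", "lake__abbrev", "label")
--
--     This:
--     (12, 'hu_mu_mh3', 'HU', 'MH3')
--     (13, 'hu_mu_mh4', 'HU', 'MH4')
--     (14, 'hu_mu_mh5', 'HU', 'MH5')
--     (15, 'hu_mu_mh6', 'HU', 'MH6')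
--     (16, 'er_mu_mich', 'ER', 'MICH')
--     (38, 'er_mu_ny', 'ER', 'NY')
--     (39, 'er_mu_o1', 'ER', 'O1')
--     (40, 'er_mu_o2', 'ER', 'O2')
--     (41, 'er_mu_o3', 'ER', 'O3')
--
--     becomes this:
--     {"HU": {"MH3":12,"MH4": 13,...}, "ER": {"NY":16}, ...}
--
--     """
--     mu_lookup = {}
--     for mu in mus:
--         lake_abbrev = mu[2]
--         items = mu_lookup.get(lake_abbrev)
--         if items:
--             # label:id
--             items[mu[3]] = mu[0]
--         else:
--             items = {mu[3]: mu[0]}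
--         mu_lookup[lake_abbrev] = items
--     return mu_lookup
-- ===== SOURCE B (Python) =====
-- def make_mu_id_lookup(mus):
--     # Two-pass: first group the tuples by lake abbreviation (insertion order
--     # preserved), then materialize each inner {label: id} dict from its group.
--     groups = {}
--     for mu in mus:
--         groups.setdefault(mu[2], []).append(mu)
--     return {lake: {mu[3]: mu[0] for mu in grp} for lake, grp in groups.items()}
-- ===== Notes on version B (the rewrite author's own statement) =====
-- stated objective: alternative
-- what changed: Replaces A's single interleaved insert-or-create loop over a nested dict with a two-pass shape: first group the tuples into per-lake lists with setdefault, then build each inner {label: id} dict from its group in a comprehension.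
import Mathlib
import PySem

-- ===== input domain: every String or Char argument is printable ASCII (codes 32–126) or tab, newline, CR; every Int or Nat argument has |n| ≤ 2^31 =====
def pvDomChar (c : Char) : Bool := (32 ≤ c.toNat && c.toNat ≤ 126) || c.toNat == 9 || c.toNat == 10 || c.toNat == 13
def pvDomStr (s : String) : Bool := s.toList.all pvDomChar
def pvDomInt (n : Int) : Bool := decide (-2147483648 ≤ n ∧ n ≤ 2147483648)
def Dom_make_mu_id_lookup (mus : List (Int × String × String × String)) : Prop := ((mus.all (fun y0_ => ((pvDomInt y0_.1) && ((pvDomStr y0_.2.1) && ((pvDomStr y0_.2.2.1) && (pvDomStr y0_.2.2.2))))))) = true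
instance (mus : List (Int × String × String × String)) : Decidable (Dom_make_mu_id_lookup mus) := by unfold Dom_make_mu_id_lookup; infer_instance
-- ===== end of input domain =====

-- B replaces A's interleaved insert-or-create loop by a two-pass group-then-materialize shape (alternative decomposition, same cost).

-- ===== PORT A =====
-- literal port of A's loop: mu_lookup.get(lake); if truthy, mutate-and-reassign, else fresh {label: id}
def make_mu_id_lookupLoop (mu_lookup : PySem.Dict String (PySem.Dict String Int))
    (mu : Int × String × String × String) : PySem.Dict String (PySem.Dict String Int) :=
  let lake_abbrev := mu.2.2.1
  let items := mu_lookup.get? lake_abbrev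
  match items with
  | some its =>
      if its.size ≠ 0 then mu_lookup.insert lake_abbrev (its.insert mu.2.2.2 mu.1)
      else mu_lookup.insert lake_abbrev (PySem.Dict.ofList [(mu.2.2.2, mu.1)])
  | none => mu_lookup.insert lake_abbrev (PySem.Dict.ofList [(mu.2.2.2, mu.1)])

def make_mu_id_lookup (mus : List (Int × String × String × String)) : List (String × List (String × Int)) :=
  ((mus.foldl make_mu_id_lookupLoop PySem.Dict.empty).items).map (fun p => (p.1, p.2.items))

-- ===== PORT B =====
-- groups.setdefault(mu[2], []).append(mu)
def make_mu_id_lookupGroup (g : PySem.Dict String (List (Int × String × String × String)))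
    (mu : Int × String × String × String) : PySem.Dict String (List (Int × String × String × String)) :=
  g.insert mu.2.2.1 (g.getD mu.2.2.1 [] ++ [mu])

-- {mu[3]: mu[0] for mu in grp}
def make_mu_id_lookupInner (grp : List (Int × String × String × String)) : PySem.Dict String Int :=
  grp.foldl (fun d mu => d.insert mu.2.2.2 mu.1) PySem.Dict.empty

def make_mu_id_lookup_alt (mus : List (Int × String × String × String)) : List (String × List (String × Int)) :=
  ((mus.foldl make_mu_id_lookupGroup PySem.Dict.empty).items).map
    (fun p => (p.1, (make_mu_id_lookupInner p.2).items))

-- ===== PRECONDITION & SPEC =====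
def Spec_make_mu_id_lookup (mus : List (Int × String × String × String)) (out : List (String × List (String × Int))) : Prop := out = make_mu_id_lookup_alt mus
instance (mus : List (Int × String × String × String)) (out : List (String × List (String × Int))) : Decidable (Spec_make_mu_id_lookup mus out) := by unfold Spec_make_mu_id_lookup; infer_instance

-- ===== CLAIM (what is proved, stated in full; the proofs are below) =====
def Claim_equal_make_mu_id_lookup : Prop := ∀ (mus : List (Int × String × String × String)), Dom_make_mu_id_lookup mus → Spec_make_mu_id_lookup mus (make_mu_id_lookup mus)

-- ===== LEMMAS AND PROOFS =====

-- mapD g f : the dict with the same keys and f applied to every value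
def mapD {α β : Type} (g : PySem.Dict String α) (f : α → β) : PySem.Dict String β :=
  PySem.Dict.mk (g.items.map (fun p => (p.1, f p.2)))

theorem get?_mapD {α β : Type} (g : PySem.Dict String α) (f : α → β) (k : String) :
    (mapD g f).get? k = (g.get? k).map f := by
  obtain ⟨l⟩ := g
  induction l with
  | nil => rfl
  | cons p rest ih =>
      obtain ⟨k', v'⟩ := p
      simp only [mapD, List.map_cons, PySem.Dict.get?_mk_cons] at *
      split_ifs with h
      · rfl
      · exact ih

theorem contains_mapD {α β : Type} (g : PySem.Dict String α) (f : α → β) (k : String) :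
    (mapD g f).contains k = g.contains k := by
  obtain ⟨l⟩ := g
  induction l with
  | nil => rfl
  | cons p rest ih =>
      simp only [mapD, List.map_cons, PySem.Dict.contains_mk] at *
      simp only [List.any_cons, ih]

theorem insert_mapD {α β : Type} (g : PySem.Dict String α) (f : α → β) (k : String) (v : α) :
    mapD (g.insert k v) f = (mapD g f).insert k (f v) := by
  apply PySem.Dict.ext
  have h1 : (mapD (g.insert k v) f).items = ((g.insert k v).items).map (fun p => (p.1, f p.2)) := rfl
  have h2 : (mapD g f).items = g.items.map (fun p => (p.1, f p.2)) := rfl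
  rw [h1, PySem.Dict.items_insert, PySem.Dict.items_insert, contains_mapD, h2]
  by_cases h : g.contains k = true
  · simp only [h, if_true, List.map_map]
    apply List.map_congr_left
    intro p _
    by_cases hp : p.1 = k
    · simp [hp]
    · simp [hp]
  · simp only [Bool.not_eq_true] at h
    simp [h]

theorem size_foldl_inner_ne_zero (l : List (Int × String × String × String))
    (d : PySem.Dict String Int) (hd : d.size ≠ 0) :
    (l.foldl (fun d mu => d.insert mu.2.2.2 mu.1) d).size ≠ 0 := by
  induction l generalizing d with
  | nil => exact hd
  | cons mu rest ih =>
      simp only [List.foldl_cons]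
      apply ih
      rw [PySem.Dict.size_insert]
      split_ifs with h
      · exact hd
      · omega

theorem inner_append (grp : List (Int × String × String × String))
    (mu : Int × String × String × String) :
    make_mu_id_lookupInner (grp ++ [mu]) = (make_mu_id_lookupInner grp).insert mu.2.2.2 mu.1 := by
  simp [make_mu_id_lookupInner, List.foldl_append]

theorem loop_eq (mus : List (Int × String × String × String))
    (g : PySem.Dict String (List (Int × String × String × String)))
    (hg : ∀ p ∈ g.items, p.2 ≠ []) :
    mus.foldl make_mu_id_lookupLoop (mapD g make_mu_id_lookupInner)
      = mapD (mus.foldl make_mu_id_lookupGroup g) make_mu_id_lookupInner := by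
  induction mus generalizing g with
  | nil => rfl
  | cons mu rest ih =>
      simp only [List.foldl_cons]
      have hstep : make_mu_id_lookupLoop (mapD g make_mu_id_lookupInner) mu
          = mapD (make_mu_id_lookupGroup g mu) make_mu_id_lookupInner := by
        unfold make_mu_id_lookupLoop make_mu_id_lookupGroup
        simp only [get?_mapD]
        cases hget : g.get? mu.2.2.1 with
        | none =>
            have hD : g.getD mu.2.2.1 [] = [] := PySem.Dict.getD_of_get?_eq_none _ _ hget
            rw [hD]
            simp only [Option.map_none]
            rw [insert_mapD]
            rfl
        | some grp =>
            have hmem : (mu.2.2.1, grp) ∈ g.items := PySem.Dict.mem_items_of_get?_eq_some _ hget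
            have hne : grp ≠ [] := hg _ hmem
            have hD : g.getD mu.2.2.1 [] = grp := by
              rw [PySem.Dict.getD_eq_get?_getD, hget]; rfl
            rw [hD]
            simp only [Option.map_some]
            have hsz : (make_mu_id_lookupInner grp).size ≠ 0 := by
              obtain ⟨a, as, rfl⟩ := List.exists_cons_of_ne_nil hne
              unfold make_mu_id_lookupInner
              simp only [List.foldl_cons]
              apply size_foldl_inner_ne_zero
              simp [PySem.Dict.size_insert]
            simp only [hsz, if_true, ne_eq, not_false_iff]
            rw [insert_mapD, inner_append]
      rw [hstep]
      apply ih
      intro p hp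
      unfold make_mu_id_lookupGroup at hp
      rcases (PySem.Dict.mem_items_insert _ _ _ _).mp hp with h | h
      · subst h; simp
      · exact hg _ h.1

-- ===== VERDICT (by name: the statement is the Claim_ definition above) =====
theorem make_mu_id_lookup_spec : Claim_equal_make_mu_id_lookup := by
  intro mus _
  unfold Spec_make_mu_id_lookup make_mu_id_lookup make_mu_id_lookup_alt
  have h := loop_eq mus PySem.Dict.empty (by intro p hp; simp [PySem.Dict.empty] at hp)
  have hempty : mapD (PySem.Dict.empty) make_mu_id_lookupInner
      = (PySem.Dict.empty : PySem.Dict String (PySem.Dict String Int)) := rfl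
  rw [hempty] at h
  rw [h]
  simp [mapD, List.map_map]
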